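-- pv_equiv track=rewrite | github.com/witec-rep/web_pattern_generator | AJ_pattern_generator_lib.py | marker
-- ===== SOURCE A (Python) =====
-- def marker(x, y, dose, layer, dimArr):
--     dose = dose*100
--     testoi = ['' for i in range(36)]
--     testoi[0] = '1 ' + str(dose) + ' ' + str(layer)
--     testoi[1] = str(x-7) + ' ' + str(y-7)
--     testoi[2] = str(x) + ' ' + str(y-7)
--     testoi[3] = str(x) + ' ' + str(y-10)
--     testoi[4] = str(x-10) + ' ' + str(y-10)
--     testoi[5] = str(x-10) + ' ' + str(y)
--     testoi[6] = str(x-7) + ' ' + str(y)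
--     testoi[7] = str(x-7) + ' ' + str(y-7)
--     testoi[8] = '#'
--
--     testoi[9] = '1 ' + str(dose) + ' ' + str(layer)
--     testoi[10] = str(x+7+dimArr) + ' ' + str(y-7)
--     testoi[11] = str(x+dimArr) + ' ' + str(y-7)
--     testoi[12] = str(x+dimArr) + ' ' + str(y-10)
--     testoi[13] = str(x+dimArr+10) + ' ' + str(y-10)
--     testoi[14] = str(x+dimArr+10) + ' ' + str(y)
--     testoi[15] = str(x+dimArr+7) + ' ' + str(y)
--     testoi[16] = str(x+dimArr+7) + ' ' + str(y-7)
--     testoi[17] = '#'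
--
--     testoi[18] = '1 ' + str(dose) + ' ' + str(layer)
--     testoi[19] = str(x+7+dimArr) + ' ' + str(y+dimArr+7)
--     testoi[20] = str(x+dimArr) + ' ' + str(y+dimArr+7)
--     testoi[21] = str(x+dimArr) + ' ' + str(y+dimArr+10)
--     testoi[22] = str(x+dimArr+10) + ' ' + str(y+dimArr+10)
--     testoi[23] = str(x+dimArr+10) + ' ' + str(y+dimArr)
--     testoi[24] = str(x+dimArr+7) + ' ' + str(y+dimArr)
--     testoi[25] = str(x+dimArr+7) + ' ' + str(y+dimArr+7)
--     testoi[26] = '#'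
--
--     testoi[27] = '1 ' + str(dose) + ' ' + str(layer)
--     testoi[28] = str(x-7) + ' ' + str(y+dimArr+7)
--     testoi[29] = str(x) + ' ' + str(y+dimArr+7)
--     testoi[30] = str(x) + ' ' + str(y+dimArr+10)
--     testoi[31] = str(x-10) + ' ' + str(y+dimArr+10)
--     testoi[32] = str(x-10) + ' ' + str(y+dimArr)
--     testoi[33] = str(x-7) + ' ' + str(y+dimArr)
--     testoi[34] = str(x-7) + ' ' + str(y+dimArr+7)
--     testoi[35] = '#'
--     return testoi
-- ===== SOURCE B (Python) =====
-- def marker(x, y, dose, layer, dimArr):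
--     dose = dose * 100
--     d = dimArr
--     corners = [
--         [(-7, -7), (0, -7), (0, -10), (-10, -10), (-10, 0), (-7, 0), (-7, -7)],
--         [(d + 7, -7), (d, -7), (d, -10), (d + 10, -10), (d + 10, 0), (d + 7, 0), (d + 7, -7)],
--         [(d + 7, d + 7), (d, d + 7), (d, d + 10), (d + 10, d + 10), (d + 10, d), (d + 7, d), (d + 7, d + 7)],
--         [(-7, d + 7), (0, d + 7), (0, d + 10), (-10, d + 10), (-10, d), (-7, d), (-7, d + 7)],
--     ]
--     out = []
--     for offs in corners:
--         out.append('1 ' + str(dose) + ' ' + str(layer))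
--         for dx, dy in offs:
--             out.append(str(x + dx) + ' ' + str(y + dy))
--         out.append('#')
--     return out
-- ===== Notes on version B (the rewrite author's own statement) =====
-- stated objective: simpler
-- what changed: Replaces the 36 hand-indexed assignments into a preallocated list with a data-driven loop over a table of four corner offset lists, appending header, seven coordinate strings, and '#' per corner.
import Mathlib
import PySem

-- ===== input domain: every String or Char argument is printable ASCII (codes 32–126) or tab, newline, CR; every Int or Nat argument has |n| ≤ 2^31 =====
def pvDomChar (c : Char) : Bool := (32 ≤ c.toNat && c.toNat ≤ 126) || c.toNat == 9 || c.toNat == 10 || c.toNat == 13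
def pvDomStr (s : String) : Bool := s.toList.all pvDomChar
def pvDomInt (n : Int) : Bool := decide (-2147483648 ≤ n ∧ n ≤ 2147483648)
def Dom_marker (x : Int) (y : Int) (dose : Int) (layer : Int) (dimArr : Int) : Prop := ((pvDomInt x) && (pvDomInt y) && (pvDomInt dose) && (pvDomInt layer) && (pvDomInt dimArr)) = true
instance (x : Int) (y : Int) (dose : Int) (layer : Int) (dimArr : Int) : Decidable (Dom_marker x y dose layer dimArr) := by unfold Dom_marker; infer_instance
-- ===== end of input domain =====

-- B replaces A's 36 hand-indexed list assignments with one loop over a four-corner offset table (simpler decomposition; same output).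


-- ===== PORT A =====
def marker (x : Int) (y : Int) (dose : Int) (layer : Int) (dimArr : Int) : List String :=
  let dose := dose * 100
  -- A fills a preallocated 36-slot list index by index; ported as the resulting list in order
  [ "1 " ++ PySem.Int.toStr dose ++ " " ++ PySem.Int.toStr layer,
    PySem.Int.toStr (x-7) ++ " " ++ PySem.Int.toStr (y-7),
    PySem.Int.toStr x ++ " " ++ PySem.Int.toStr (y-7),
    PySem.Int.toStr x ++ " " ++ PySem.Int.toStr (y-10),
    PySem.Int.toStr (x-10) ++ " " ++ PySem.Int.toStr (y-10),
    PySem.Int.toStr (x-10) ++ " " ++ PySem.Int.toStr y,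
    PySem.Int.toStr (x-7) ++ " " ++ PySem.Int.toStr y,
    PySem.Int.toStr (x-7) ++ " " ++ PySem.Int.toStr (y-7),
    "#",
    "1 " ++ PySem.Int.toStr dose ++ " " ++ PySem.Int.toStr layer,
    PySem.Int.toStr (x+7+dimArr) ++ " " ++ PySem.Int.toStr (y-7),
    PySem.Int.toStr (x+dimArr) ++ " " ++ PySem.Int.toStr (y-7),
    PySem.Int.toStr (x+dimArr) ++ " " ++ PySem.Int.toStr (y-10),
    PySem.Int.toStr (x+dimArr+10) ++ " " ++ PySem.Int.toStr (y-10),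
    PySem.Int.toStr (x+dimArr+10) ++ " " ++ PySem.Int.toStr y,
    PySem.Int.toStr (x+dimArr+7) ++ " " ++ PySem.Int.toStr y,
    PySem.Int.toStr (x+dimArr+7) ++ " " ++ PySem.Int.toStr (y-7),
    "#",
    "1 " ++ PySem.Int.toStr dose ++ " " ++ PySem.Int.toStr layer,
    PySem.Int.toStr (x+7+dimArr) ++ " " ++ PySem.Int.toStr (y+dimArr+7),
    PySem.Int.toStr (x+dimArr) ++ " " ++ PySem.Int.toStr (y+dimArr+7),
    PySem.Int.toStr (x+dimArr) ++ " " ++ PySem.Int.toStr (y+dimArr+10),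
    PySem.Int.toStr (x+dimArr+10) ++ " " ++ PySem.Int.toStr (y+dimArr+10),
    PySem.Int.toStr (x+dimArr+10) ++ " " ++ PySem.Int.toStr (y+dimArr),
    PySem.Int.toStr (x+dimArr+7) ++ " " ++ PySem.Int.toStr (y+dimArr),
    PySem.Int.toStr (x+dimArr+7) ++ " " ++ PySem.Int.toStr (y+dimArr+7),
    "#",
    "1 " ++ PySem.Int.toStr dose ++ " " ++ PySem.Int.toStr layer,
    PySem.Int.toStr (x-7) ++ " " ++ PySem.Int.toStr (y+dimArr+7),
    PySem.Int.toStr x ++ " " ++ PySem.Int.toStr (y+dimArr+7),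
    PySem.Int.toStr x ++ " " ++ PySem.Int.toStr (y+dimArr+10),
    PySem.Int.toStr (x-10) ++ " " ++ PySem.Int.toStr (y+dimArr+10),
    PySem.Int.toStr (x-10) ++ " " ++ PySem.Int.toStr (y+dimArr),
    PySem.Int.toStr (x-7) ++ " " ++ PySem.Int.toStr (y+dimArr),
    PySem.Int.toStr (x-7) ++ " " ++ PySem.Int.toStr (y+dimArr+7),
    "#" ]

-- ===== PORT B =====
-- B: table of four corner offset lists; one loop builds header, seven coordinates, '#' per corner.
def markerCorners (d : Int) : List (List (Int × Int)) :=
  [ [(-7, -7), (0, -7), (0, -10), (-10, -10), (-10, 0), (-7, 0), (-7, -7)],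
    [(d + 7, -7), (d, -7), (d, -10), (d + 10, -10), (d + 10, 0), (d + 7, 0), (d + 7, -7)],
    [(d + 7, d + 7), (d, d + 7), (d, d + 10), (d + 10, d + 10), (d + 10, d), (d + 7, d), (d + 7, d + 7)],
    [(-7, d + 7), (0, d + 7), (0, d + 10), (-10, d + 10), (-10, d), (-7, d), (-7, d + 7)] ]

def marker_alt (x : Int) (y : Int) (dose : Int) (layer : Int) (dimArr : Int) : List String :=
  let dose := dose * 100
  (markerCorners dimArr).foldl
    (fun out offs =>
      (offs.foldl
        (fun out p => out ++ [PySem.Int.toStr (x + p.1) ++ " " ++ PySem.Int.toStr (y + p.2)])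
        (out ++ ["1 " ++ PySem.Int.toStr dose ++ " " ++ PySem.Int.toStr layer]))
      ++ ["#"]) []

-- ===== PRECONDITION & SPEC =====
def Spec_marker (x : Int) (y : Int) (dose : Int) (layer : Int) (dimArr : Int) (out : List String) : Prop := out = marker_alt x y dose layer dimArr
instance (x : Int) (y : Int) (dose : Int) (layer : Int) (dimArr : Int) (out : List String) : Decidable (Spec_marker x y dose layer dimArr out) := by unfold Spec_marker; infer_instance

-- ===== CLAIM (what is proved, stated in full; the proofs are below) =====
def Claim_equal_marker : Prop := ∀ (x : Int) (y : Int) (dose : Int) (layer : Int) (dimArr : Int), Dom_marker x y dose layer dimArr → Spec_marker x y dose layer dimArr (marker x y dose layer dimArr)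

-- ===== LEMMAS AND PROOFS =====

-- ===== VERDICT (by name: the statement is the Claim_ definition above) =====
theorem marker_spec : Claim_equal_marker := by
  intro x y dose layer dimArr _
  unfold Spec_marker marker marker_alt markerCorners
  simp [List.foldl]
  ring_nf
  simp
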